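-- pv_equiv track=rewrite | github.com/Yeewon/Algorithm | python/파이썬 스터디 문제 풀이/힙/게임아이템.py | solution
-- ===== SOURCE A (Python) =====
-- import heapq
-- from collections import deque
--
-- def solution(healths, items):
--     item_indexes = []
--     appliable_items = []
--     heapq.heapify(appliable_items)
--
--     healths.sort()
--     items = [(buff, debuff, index) for index, (buff, debuff) in enumerate(items, 1)]
--     BUFF, DEBUFF, INDEX = 0, 1, 2
--     items.sort(key=lambda item: item[DEBUFF])
--     items = deque(items)
--
--     for health in healths:
--         while items and health - items[0][DEBUFF] >= 100:
--             item = items.popleft()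
--             heapq.heappush(appliable_items, (-item[BUFF], item[INDEX]))
--         if appliable_items:
--             _, index = heapq.heappop(appliable_items)
--             item_indexes.append(index)
--     item_indexes.sort()
--     return item_indexes
-- ===== SOURCE B (Python) =====
-- def solution(healths, items):
--     healths.sort()  # same in-place sort of healths as the original
--     avail = [(buff, debuff, i) for i, (buff, debuff) in enumerate(items, 1)]
--     chosen = []
--     for health in healths:
--         best = None
--         for it in avail:
--             if health - it[1] >= 100:
--                 if best is None or (it[0], -it[2]) > (best[0], -best[2]):
--                     best = it
--         if best is not None:
--             avail.remove(best)
--             chosen.append(best[2])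
--     chosen.sort()
--     return chosen
-- ===== Notes on version B (the rewrite author's own statement) =====
-- stated objective: simpler
-- what changed: Replaces the debuff-sorted deque + max-heap machinery with a direct greedy scan: for each health (ascending) B scans the remaining items once and picks the usable one with the largest buff (smallest index on ties), removing it from the pool.
import Mathlib
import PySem

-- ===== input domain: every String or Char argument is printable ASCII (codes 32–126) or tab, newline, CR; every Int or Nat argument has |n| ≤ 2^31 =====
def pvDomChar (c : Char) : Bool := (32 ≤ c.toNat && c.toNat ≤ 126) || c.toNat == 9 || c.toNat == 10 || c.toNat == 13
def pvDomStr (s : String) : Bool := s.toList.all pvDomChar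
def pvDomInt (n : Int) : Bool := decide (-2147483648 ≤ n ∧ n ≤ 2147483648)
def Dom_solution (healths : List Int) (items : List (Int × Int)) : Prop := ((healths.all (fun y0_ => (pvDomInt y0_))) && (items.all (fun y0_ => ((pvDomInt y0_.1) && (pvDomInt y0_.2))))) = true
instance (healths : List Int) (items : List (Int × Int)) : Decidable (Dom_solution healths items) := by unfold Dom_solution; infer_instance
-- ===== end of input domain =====

-- B replaces the debuff-sorted deque + max-heap with a direct greedy scan over a remaining-items
-- pool (same results; objective: simpler). Both implementations sort `healths` in place (Python
-- side); the theorems here are about the return value.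


-- ===== PORT A =====
-- heapq on tuples modelled as an ordered list: heappush = ordered insert under the Python tuple
-- order, heappop = take the head; exact for the push/pop priority-queue behaviour of heapq
-- (the keys pushed here are pairs of ints).
def keyLt (a b : Int × Int) : Bool := a.1 < b.1 || (a.1 == b.1 && a.2 < b.2)

def hpush (k : Int × Int) : List (Int × Int) → List (Int × Int)
  | [] => [k]
  | x :: xs => if keyLt k x then k :: x :: xs else x :: hpush k xs

-- the inner `while items and health - items[0][DEBUFF] >= 100` loop
def drainA (h : Int) : List (Int × Int × Int) → List (Int × Int) → (List (Int × Int × Int)) × (List (Int × Int))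
  | [], heap => ([], heap)
  | it :: rest, heap =>
      if 100 ≤ h - it.2.1 then drainA h rest (hpush (-it.1, it.2.2) heap)
      else (it :: rest, heap)

-- the `for health in healths` loop (state: deque of items, heap, collected indexes)
def loopA : List Int → List (Int × Int × Int) → List (Int × Int) → List Int → List Int
  | [], _, _, acc => acc
  | h :: hs, q, heap, acc =>
      let p := drainA h q heap
      match p.2 with
      | [] => loopA hs p.1 [] acc
      | k :: rest => loopA hs p.1 rest (acc ++ [k.2])

def solution (healths : List Int) (items : List (Int × Int)) : List Int :=
  let healths' := PySem.List.sorted healths (fun x => x) false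
  let anno := (PySem.List.enumerate items 1).map (fun p => (p.2.1, p.2.2, p.1))
  let q := PySem.List.sorted anno (fun it => it.2.1) false
  PySem.List.sorted (loopA healths' q [] []) (fun x => x) false

-- ===== PORT B =====
-- (it[0], -it[2]) > (best[0], -best[2]) : Python lexicographic tuple comparison
def betterB (it best : Int × Int × Int) : Bool :=
  best.1 < it.1 || (it.1 == best.1 && -best.2.2 < -it.2.2)

-- body of B's inner `for it in avail` loop
def pickStep (h : Int) (best : Option (Int × Int × Int)) (it : Int × Int × Int) : Option (Int × Int × Int) :=
  if 100 ≤ h - it.2.1 then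
    match best with
    | none => some it
    | some b => if betterB it b then some it else best
  else best

def pickBest (h : Int) (avail : List (Int × Int × Int)) : Option (Int × Int × Int) :=
  avail.foldl (pickStep h) none

def loopB : List Int → List (Int × Int × Int) → List Int → List Int
  | [], _, acc => acc
  | h :: hs, avail, acc =>
      match pickBest h avail with
      | none => loopB hs avail acc
      | some b => loopB hs (avail.erase b) (acc ++ [b.2.2])

def solution_alt (healths : List Int) (items : List (Int × Int)) : List Int :=
  let healths' := PySem.List.sorted healths (fun x => x) false
  let avail := (PySem.List.enumerate items 1).map (fun p => (p.2.1, p.2.2, p.1))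
  PySem.List.sorted (loopB healths' avail []) (fun x => x) false

-- ===== PRECONDITION & SPEC =====
def Spec_solution (healths : List Int) (items : List (Int × Int)) (out : List Int) : Prop := out = solution_alt healths items
instance (healths : List Int) (items : List (Int × Int)) (out : List Int) : Decidable (Spec_solution healths items out) := by unfold Spec_solution; infer_instance

-- ===== CLAIM (what is proved, stated in full; the proofs are below) =====
def Claim_equal_solution : Prop := ∀ (healths : List Int) (items : List (Int × Int)), Dom_solution healths items → Spec_solution healths items (solution healths items)

-- ===== LEMMAS AND PROOFS =====

-- the Python tuple order on heap keys, as a Prop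
def klt (a b : Int × Int) : Prop := a.1 < b.1 ∨ (a.1 = b.1 ∧ a.2 < b.2)

-- the heap key of an annotated item
def keyOf (it : Int × Int × Int) : Int × Int := (-it.1, it.2.2)

theorem keyLt_iff (a b : Int × Int) : keyLt a b = true ↔ klt a b := by
  simp [keyLt, klt]

theorem klt_irrefl (a : Int × Int) : ¬ klt a a := by
  simp [klt]

theorem klt_trans {a b c : Int × Int} (h1 : klt a b) (h2 : klt b c) : klt a c := by
  obtain ⟨a1, a2⟩ := a; obtain ⟨b1, b2⟩ := b; obtain ⟨c1, c2⟩ := c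
  simp only [klt] at *; omega

theorem klt_cases (a b : Int × Int) : klt a b ∨ a = b ∨ klt b a := by
  obtain ⟨a1, a2⟩ := a; obtain ⟨b1, b2⟩ := b
  simp only [klt, Prod.mk.injEq]; omega

theorem betterB_iff (it b : Int × Int × Int) : betterB it b = true ↔ klt (keyOf it) (keyOf b) := by
  simp only [betterB, klt, keyOf, Bool.or_eq_true, Bool.and_eq_true, decide_eq_true_eq, beq_iff_eq]
  omega

theorem hpush_perm (k : Int × Int) (l : List (Int × Int)) : (hpush k l).Perm (k :: l) := by
  induction l with
  | nil => simp [hpush]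
  | cons x xs ih =>
      simp only [hpush]
      split
      · exact List.Perm.refl _
      · exact (ih.cons x).trans (List.Perm.swap k x xs)

theorem hpush_pairwise {k : Int × Int} {l : List (Int × Int)} (hk : k ∉ l)
    (hl : l.Pairwise klt) : (hpush k l).Pairwise klt := by
  induction l with
  | nil => simp [hpush]
  | cons x xs ih =>
      obtain ⟨hx, hxs⟩ := List.pairwise_cons.mp hl
      simp only [hpush]
      split
      · rename_i hkx
        have hkx' := (keyLt_iff k x).mp hkx
        exact List.pairwise_cons.mpr ⟨by
          intro y hy
          rcases List.mem_cons.mp hy with rfl | hy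
          · exact hkx'
          · exact klt_trans hkx' (hx y hy), hl⟩
      · rename_i hkx
        have hxk : klt x k := by
          rcases klt_cases k x with h | h | h
          · exact absurd ((keyLt_iff k x).mpr h) (by simpa using hkx)
          · exact absurd h.symm (by intro he; exact hk (he ▸ List.mem_cons_self ..))
          · exact h
        refine List.pairwise_cons.mpr ⟨?_, ih (fun hm => hk (List.mem_cons_of_mem _ hm)) hxs⟩
        intro y hy
        have : y ∈ (k :: xs) := (hpush_perm k xs).mem_iff.mp hy
        rcases List.mem_cons.mp this with rfl | hy'
        · exact hxk
        · exact hx y hy'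

-- proof-side abbreviations for the loop bodies
def feasF (h : Int) (it : Int × Int × Int) : Bool := decide (100 ≤ h - it.2.1)
def pushF (hp : List (Int × Int)) (it : Int × Int × Int) : List (Int × Int) := hpush (-it.1, it.2.2) hp

theorem drainA_spec (h : Int) : ∀ (q : List (Int × Int × Int)) (heap : List (Int × Int)),
    q.Pairwise (fun a b => a.2.1 ≤ b.2.1) →
    drainA h q heap = (q.filter (fun it => !feasF h it), (q.filter (feasF h)).foldl pushF heap) := by
  intro q
  induction q with
  | nil => intro heap _; simp [drainA]
  | cons it rest ih =>
      intro heap hq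
      obtain ⟨hit, hrest⟩ := List.pairwise_cons.mp hq
      by_cases hc : 100 ≤ h - it.2.1
      · simp only [drainA, List.filter_cons, feasF, hc, decide_true, Bool.not_true]
        exact ih _ hrest
      · have hall : ∀ x ∈ it :: rest, ¬ (100 ≤ h - x.2.1) := by
          intro x hx
          rcases List.mem_cons.mp hx with rfl | hx
          · exact hc
          · have := hit x hx; omega
        have h1 : (it :: rest).filter (feasF h) = [] := by
          rw [List.filter_eq_nil_iff]
          intro x hx; simpa [feasF] using hall x hx
        have h2 : (it :: rest).filter (fun it => !feasF h it) = it :: rest := by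
          rw [List.filter_eq_self]
          intro x hx; simpa [feasF] using hall x hx
        simp only [drainA, if_neg hc, h1, h2, List.foldl_nil]

theorem pushList_perm : ∀ (ms : List (Int × Int × Int)) (heap : List (Int × Int)),
    (ms.foldl pushF heap).Perm (heap ++ ms.map keyOf) := by
  intro ms
  induction ms with
  | nil => intro heap; simp
  | cons it rest ih =>
      intro heap
      simp only [List.foldl_cons, List.map_cons]
      refine (ih _).trans ?_
      refine (((hpush_perm _ heap).append_right _).trans ?_)
      exact List.perm_middle.symm

theorem pushList_sorted : ∀ (ms : List (Int × Int × Int)) (heap : List (Int × Int)),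
    (heap ++ ms.map keyOf).Nodup → heap.Pairwise klt →
    (ms.foldl pushF heap).Pairwise klt := by
  intro ms
  induction ms with
  | nil => intro heap _ hs; simpa
  | cons it rest ih =>
      intro heap hnd hs
      simp only [List.foldl_cons]
      have hk : (-it.1, it.2.2) ∉ heap := by
        have := List.disjoint_of_nodup_append hnd
        intro hm
        exact this hm (by simp [keyOf])
      refine ih _ ?_ (hpush_pairwise hk hs)
      have hperm : ((pushF heap it) ++ rest.map keyOf).Perm
          (heap ++ (it :: rest).map keyOf) := by
        refine ((hpush_perm _ heap).append_right _).trans ?_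
        simpa [keyOf] using (List.perm_middle.symm :
          (keyOf it :: (heap ++ rest.map keyOf)).Perm (heap ++ keyOf it :: rest.map keyOf))
      exact hperm.nodup_iff.mpr hnd

theorem map_erase_keyOf :
    ∀ (l : List (Int × Int × Int)) (b : Int × Int × Int), b ∈ l → (l.map keyOf).Nodup →
    (l.erase b).map keyOf = (l.map keyOf).erase (keyOf b) := by
  intro l
  induction l with
  | nil => intro b hb; simp at hb
  | cons x xs ih =>
      intro b hb hnd
      by_cases hx : x = b
      · subst hx
        simp [List.erase_cons_head]
      · have hbx : b ∈ xs := by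
          rcases List.mem_cons.mp hb with h | h
          · exact absurd h.symm hx
          · exact h
        have hfx : keyOf x ≠ keyOf b := by
          intro he
          have : keyOf b ∈ xs.map keyOf := List.mem_map_of_mem hbx
          rw [← he] at this
          exact (List.nodup_cons.mp (by simpa using hnd)).1 this
        rw [List.erase_cons_tail (by simpa using hx)]
        simp only [List.map_cons]
        rw [List.erase_cons_tail (by simpa using hfx)]
        rw [ih b hbx (List.nodup_cons.mp (by simpa using hnd)).2]

theorem pick_go_spec (h : Int) : ∀ (l : List (Int × Int × Int)) (b0 : Int × Int × Int),
    ∃ b, l.foldl (pickStep h) (some b0) = some b ∧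
      (b = b0 ∨ (b ∈ l ∧ 100 ≤ h - b.2.1)) ∧
      (∀ it ∈ l, 100 ≤ h - it.2.1 → ¬ klt (keyOf it) (keyOf b)) ∧
      ¬ klt (keyOf b0) (keyOf b) := by
  intro l
  induction l with
  | nil =>
      intro b0
      exact ⟨b0, rfl, Or.inl rfl, by simp, klt_irrefl _⟩
  | cons it rest ih =>
      intro b0
      by_cases hf : 100 ≤ h - it.2.1
      · by_cases hbet : betterB it b0 = true
        · have hlt := (betterB_iff it b0).mp hbet
          obtain ⟨b, heq, hmem, hmin, hmin0⟩ := ih it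
          refine ⟨b, ?_, ?_, ?_, ?_⟩
          · simpa [pickStep, hf, hbet] using heq
          · rcases hmem with rfl | ⟨hm, hfb⟩
            · exact Or.inr ⟨List.mem_cons_self .., hf⟩
            · exact Or.inr ⟨List.mem_cons_of_mem _ hm, hfb⟩
          · intro x hx hfx
            rcases List.mem_cons.mp hx with rfl | hx'
            · exact hmin0
            · exact hmin x hx' hfx
          · intro hc
            exact hmin0 (klt_trans hlt hc)
        · obtain ⟨b, heq, hmem, hmin, hmin0⟩ := ih b0
          refine ⟨b, ?_, ?_, ?_, hmin0⟩
          · simpa [pickStep, hf, hbet] using heq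
          · rcases hmem with rfl | ⟨hm, hfb⟩
            · exact Or.inl rfl
            · exact Or.inr ⟨List.mem_cons_of_mem _ hm, hfb⟩
          · intro x hx hfx
            rcases List.mem_cons.mp hx with rfl | hx'
            · intro hc
              have hxb0 : ¬ klt (keyOf x) (keyOf b0) := by
                intro hc'
                exact hbet ((betterB_iff x b0).mpr hc')
              rcases klt_cases (keyOf b0) (keyOf x) with h1 | h1 | h1
              · exact hmin0 (klt_trans h1 hc)
              · exact hmin0 (h1 ▸ hc)
              · exact hxb0 h1
            · exact hmin x hx' hfx
      · obtain ⟨b, heq, hmem, hmin, hmin0⟩ := ih b0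
        refine ⟨b, ?_, ?_, ?_, hmin0⟩
        · simpa [pickStep, hf] using heq
        · rcases hmem with rfl | ⟨hm, hfb⟩
          · exact Or.inl rfl
          · exact Or.inr ⟨List.mem_cons_of_mem _ hm, hfb⟩
        · intro x hx hfx
          rcases List.mem_cons.mp hx with rfl | hx'
          · exact absurd hfx hf
          · exact hmin x hx' hfx

theorem pickBest_none_iff (h : Int) : ∀ (l : List (Int × Int × Int)),
    pickBest h l = none ↔ ∀ it ∈ l, ¬ (100 ≤ h - it.2.1) := by
  intro l
  induction l with
  | nil => simp [pickBest]
  | cons it rest ih =>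
      by_cases hf : 100 ≤ h - it.2.1
      · constructor
        · intro hres
          obtain ⟨b, heq, _, _, _⟩ := pick_go_spec h rest it
          rw [pickBest, List.foldl_cons] at hres
          simp only [pickStep, hf, if_pos] at hres
          rw [heq] at hres
          exact absurd hres (by simp)
        · intro hall
          exact absurd hf (hall it (List.mem_cons_self ..))
      · rw [pickBest, List.foldl_cons]
        simp only [pickStep, hf, if_false]
        rw [← pickBest]
        rw [ih]
        constructor
        · intro hall x hx
          rcases List.mem_cons.mp hx with rfl | hx'
          · exact hf
          · exact hall x hx'
        · intro hall x hx
          exact hall x (List.mem_cons_of_mem _ hx)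

theorem pickBest_some_spec (h : Int) : ∀ (l : List (Int × Int × Int)) (b : Int × Int × Int),
    pickBest h l = some b →
    b ∈ l ∧ 100 ≤ h - b.2.1 ∧ ∀ it ∈ l, 100 ≤ h - it.2.1 → ¬ klt (keyOf it) (keyOf b) := by
  intro l
  induction l with
  | nil => intro b hb; simp [pickBest] at hb
  | cons it rest ih =>
      intro b hb
      by_cases hf : 100 ≤ h - it.2.1
      · obtain ⟨b', heq, hmem, hmin, hmin0⟩ := pick_go_spec h rest it
        rw [pickBest, List.foldl_cons] at hb
        simp only [pickStep, hf, if_pos] at hb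
        rw [heq] at hb
        obtain rfl : b' = b := by injection hb
        refine ⟨?_, ?_, ?_⟩
        · rcases hmem with rfl | ⟨hm, _⟩
          · exact List.mem_cons_self ..
          · exact List.mem_cons_of_mem _ hm
        · rcases hmem with rfl | ⟨_, hfb⟩
          · exact hf
          · exact hfb
        · intro x hx hfx
          rcases List.mem_cons.mp hx with rfl | hx'
          · exact hmin0
          · exact hmin x hx' hfx
      · rw [pickBest, List.foldl_cons] at hb
        simp only [pickStep, hf, if_false] at hb
        rw [← pickBest] at hb
        obtain ⟨hm, hfb, hmin⟩ := ih b hb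
        refine ⟨List.mem_cons_of_mem _ hm, hfb, ?_⟩
        intro x hx hfx
        rcases List.mem_cons.mp hx with rfl | hx'
        · exact absurd hfx hf
        · exact hmin x hx' hfx

theorem loop_eq : ∀ (hs : List Int) (q done avail : List (Int × Int × Int))
    (heap : List (Int × Int)) (acc : List Int),
    hs.Pairwise (· ≤ ·) →
    q.Pairwise (fun a b => a.2.1 ≤ b.2.1) →
    heap.Perm (done.map keyOf) →
    heap.Pairwise klt →
    avail.Perm (done ++ q) →
    ((done ++ q).map keyOf).Nodup →
    (∀ it ∈ done, ∀ h ∈ hs, 100 ≤ h - it.2.1) →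
    loopA hs q heap acc = loopB hs avail acc := by
  intro hs
  induction hs with
  | nil => intro q done avail heap acc _ _ _ _ _ _ _; rfl
  | cons h hs ih =>
      intro q done avail heap acc hhs hq hperm hsorted havail hnd hdone
      obtain ⟨hh, hhs'⟩ := List.pairwise_cons.mp hhs
      have hdq := drainA_spec h q heap hq
      -- key facts about the drained state
      have hd2perm : ((done ++ q.filter (feasF h)) ++ q.filter (fun it => !feasF h it)).Perm (done ++ q) := by
        rw [List.append_assoc]
        exact List.Perm.append_left done (List.filter_append_perm (feasF h) q)
      have hnd2 : (((done ++ q.filter (feasF h)) ++ q.filter (fun it => !feasF h it)).map keyOf).Nodup :=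
        ((hd2perm.map keyOf).nodup_iff).mpr hnd
      have hndD2 : ((done ++ q.filter (feasF h)).map keyOf).Nodup := by
        rw [List.map_append] at hnd2
        exact (List.nodup_append.mp hnd2).1
      have hheapnd : (heap ++ (q.filter (feasF h)).map keyOf).Nodup := by
        have hp2 : (heap ++ (q.filter (feasF h)).map keyOf).Perm ((done ++ q.filter (feasF h)).map keyOf) := by
          rw [List.map_append]
          exact hperm.append_right _
        exact hp2.nodup_iff.mpr hndD2
      have hperm2 : ((q.filter (feasF h)).foldl pushF heap).Perm ((done ++ q.filter (feasF h)).map keyOf) := by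
        refine (pushList_perm _ _).trans ?_
        rw [List.map_append]
        exact hperm.append_right _
      have hsorted2 : ((q.filter (feasF h)).foldl pushF heap).Pairwise klt :=
        pushList_sorted _ _ hheapnd hsorted
      have hfeasavail : (avail.filter (feasF h)).Perm (done ++ q.filter (feasF h)) := by
        refine (havail.filter (feasF h)).trans ?_
        rw [List.filter_append]
        have : done.filter (feasF h) = done := by
          rw [List.filter_eq_self]
          intro x hx
          simpa [feasF] using hdone x hx h (List.mem_cons_self ..)
        rw [this]
      have hq2pw : (q.filter (fun it => !feasF h it)).Pairwise (fun a b => a.2.1 ≤ b.2.1) :=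
        hq.sublist List.filter_sublist
      rcases hcase : (q.filter (feasF h)).foldl pushF heap with _ | ⟨k, rest⟩
      · -- heap empty after draining: no item is usable
        rw [hcase] at hperm2
        have hmapnil : (done ++ q.filter (feasF h)).map keyOf = [] :=
          List.perm_nil.mp hperm2.symm
        obtain ⟨hdnil, hmnil⟩ := List.append_eq_nil_iff.mp (List.map_eq_nil_iff.mp hmapnil)
        have hq2eq : q.filter (fun it => !feasF h it) = q := by
          rw [List.filter_eq_self]
          intro x hx
          have : x ∉ q.filter (feasF h) := by rw [hmnil]; simp
          simp only [List.mem_filter, hx, true_and] at this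
          simpa using this
        have hnofeas : ∀ it ∈ avail, ¬ (100 ≤ h - it.2.1) := by
          intro it hit
          have h1 : it ∈ done ++ q := havail.subset hit
          rw [hdnil, List.nil_append] at h1
          intro hc
          have : it ∈ q.filter (feasF h) := List.mem_filter.mpr ⟨h1, by simpa [feasF] using hc⟩
          rw [hmnil] at this
          simp at this
        have hA : loopA (h :: hs) q heap acc = loopA hs (q.filter (fun it => !feasF h it)) [] acc := by
          simp only [loopA]
          rw [hdq, hcase]
        have hB : loopB (h :: hs) avail acc = loopB hs avail acc := by
          simp only [loopB]
          rw [(pickBest_none_iff h avail).mpr hnofeas]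
        rw [hA, hB, hq2eq]
        refine ih q [] avail [] acc hhs' hq (by simp) (by simp) ?_ ?_ (by simp)
        · simpa [hdnil] using havail
        · simpa [hdnil] using hnd
      · -- heap head k is the chosen item
        rw [hcase] at hperm2 hsorted2
        have hkmem : k ∈ (done ++ q.filter (feasF h)).map keyOf :=
          hperm2.subset (List.mem_cons_self ..)
        obtain ⟨a0, ha0mem, ha0key⟩ := List.mem_map.mp hkmem
        have ha0feas : 100 ≤ h - a0.2.1 := by
          rcases List.mem_append.mp ha0mem with hL | hR
          · exact hdone a0 hL h (List.mem_cons_self ..)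
          · simpa [feasF] using (List.mem_filter.mp hR).2
        have ha0avail : a0 ∈ avail := by
          refine havail.mem_iff.mpr (List.mem_append.mpr ?_)
          rcases List.mem_append.mp ha0mem with hL | hR
          · exact Or.inl hL
          · exact Or.inr (List.mem_of_mem_filter hR)
        cases hp : pickBest h avail with
        | none =>
            exact absurd ha0feas ((pickBest_none_iff h avail).mp hp a0 ha0avail)
        | some b =>
            obtain ⟨hbavail, hbfeas, hbmin⟩ := pickBest_some_spec h avail b hp
            have hbd2 : b ∈ done ++ q.filter (feasF h) := by
              have h1 : b ∈ done ++ q := havail.subset hbavail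
              rcases List.mem_append.mp h1 with hL | hR
              · exact List.mem_append.mpr (Or.inl hL)
              · exact List.mem_append.mpr (Or.inr (List.mem_filter.mpr ⟨hR, by simpa [feasF] using hbfeas⟩))
            have hkb : keyOf b = k := by
              have h1 : ¬ klt k (keyOf b) := by
                rw [← ha0key]
                exact hbmin a0 ha0avail ha0feas
              have h2 : keyOf b ∈ k :: rest := hperm2.mem_iff.mpr (List.mem_map_of_mem hbd2)
              rcases List.mem_cons.mp h2 with he | hr
              · exact he
              · exact absurd ((List.pairwise_cons.mp hsorted2).1 _ hr) h1
            have hidx : k.2 = b.2.2 := by rw [← hkb]; rfl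
            have hA : loopA (h :: hs) q heap acc =
                loopA hs (q.filter (fun it => !feasF h it)) rest (acc ++ [k.2]) := by
              simp only [loopA]
              rw [hdq, hcase]
            have hB : loopB (h :: hs) avail acc = loopB hs (avail.erase b) (acc ++ [b.2.2]) := by
              simp only [loopB]
              rw [hp]
            rw [hA, hB, hidx]
            have hrest : rest.Perm (((done ++ q.filter (feasF h)).erase b).map keyOf) := by
              rw [map_erase_keyOf _ b hbd2 hndD2, hkb]
              have := hperm2.erase k
              simpa using this
            have haerase : (avail.erase b).Perm
                ((done ++ q.filter (feasF h)).erase b ++ q.filter (fun it => !feasF h it)) := by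
              have e3 : avail.Perm ((done ++ q.filter (feasF h)) ++ q.filter (fun it => !feasF h it)) :=
                havail.trans hd2perm.symm
              have := e3.erase b
              rwa [List.erase_append_left _ hbd2] at this
            have hsub : List.Sublist (((done ++ q.filter (feasF h)).erase b ++ q.filter (fun it => !feasF h it)))
                ((done ++ q.filter (feasF h)) ++ q.filter (fun it => !feasF h it)) :=
              (List.erase_sublist).append (List.Sublist.refl _)
            refine ih (q.filter (fun it => !feasF h it)) ((done ++ q.filter (feasF h)).erase b)
              (avail.erase b) rest (acc ++ [b.2.2]) hhs' hq2pw hrest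
              (List.pairwise_cons.mp hsorted2).2 haerase (hnd2.sublist (hsub.map keyOf)) ?_
            intro it hit h' hh'
            have hit2 : it ∈ done ++ q.filter (feasF h) := (List.erase_sublist).subset hit
            rcases List.mem_append.mp hit2 with hL | hR
            · exact hdone it hL h' (List.mem_cons_of_mem _ hh')
            · have h1 : 100 ≤ h - it.2.1 := by simpa [feasF] using (List.mem_filter.mp hR).2
              have h2 : h ≤ h' := hh h' hh'
              omega

theorem anno_keys_nodup (items : List (Int × Int)) :
    (((PySem.List.enumerate items 1).map (fun p => (p.2.1, p.2.2, p.1))).map keyOf).Nodup := by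
  rw [List.map_map]
  refine List.Pairwise.map _ ?_ (PySem.List.pairwise_lt_enumerate items 1)
  intro a b hab
  simp only [Function.comp, keyOf, ne_eq, Prod.mk.injEq, not_and]
  intro _ h2
  omega

-- ===== VERDICT (by name: the statement is the Claim_ definition above) =====
theorem solution_spec : Claim_equal_solution := by
  intro healths items _
  unfold Spec_solution solution solution_alt
  have hmain : loopA (PySem.List.sorted healths (fun x => x) false)
      (PySem.List.sorted ((PySem.List.enumerate items 1).map (fun p => (p.2.1, p.2.2, p.1)))
        (fun it => it.2.1) false) [] [] =
      loopB (PySem.List.sorted healths (fun x => x) false)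
      ((PySem.List.enumerate items 1).map (fun p => (p.2.1, p.2.2, p.1))) [] := by
    refine loop_eq _ _ [] _ [] []
      (PySem.List.sorted_pairwise healths (fun x => x)) (PySem.List.sorted_pairwise _ _)
      (by simp) (by simp) ?_ ?_ (by simp)
    · simpa using (PySem.List.sorted_perm _ _ _).symm
    · simpa using ((PySem.List.sorted_perm _ (fun it : Int × Int × Int => it.2.1) false).map keyOf).nodup_iff.mpr (anno_keys_nodup items)
  simp only [hmain]
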